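-- pv_equiv track=rewrite | github.com/pravash02/interviewbit_programs | two_pointers/maximum_ones_after_modification.py | solveC
-- ===== SOURCE A (Python) =====
-- def solveC(A, B):
--     ans = 0
--     zeros = 0
--     n = len(A)
--     j = 0
--     for i in range(n):
--         if A[i] == 0:
--             zeros += 1
--
--         while zeros > B:
--             if A[j] == 0:
--                 zeros -= 1
--             j += 1
--         ans = max(ans, i-j+1)
--
--     return ans
-- ===== SOURCE B (Python) =====
-- def solveC(A, B):
--     zeros = 0
--     j = 0
--     for i in range(len(A)):
--         if A[i] == 0:
--             zeros += 1
--         if zeros > B: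
--             if A[j] == 0:
--                 zeros -= 1
--             j += 1
--     return len(A) - j
-- ===== Notes on version B (the rewrite author's own statement) =====
-- stated objective: simpler
-- what changed: Replaced the restoring while-loop and the running max by the classic non-shrinking sliding window: one 'if' advances the left pointer by at most one per step and the answer is read off as n - j at the end.
import Mathlib
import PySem

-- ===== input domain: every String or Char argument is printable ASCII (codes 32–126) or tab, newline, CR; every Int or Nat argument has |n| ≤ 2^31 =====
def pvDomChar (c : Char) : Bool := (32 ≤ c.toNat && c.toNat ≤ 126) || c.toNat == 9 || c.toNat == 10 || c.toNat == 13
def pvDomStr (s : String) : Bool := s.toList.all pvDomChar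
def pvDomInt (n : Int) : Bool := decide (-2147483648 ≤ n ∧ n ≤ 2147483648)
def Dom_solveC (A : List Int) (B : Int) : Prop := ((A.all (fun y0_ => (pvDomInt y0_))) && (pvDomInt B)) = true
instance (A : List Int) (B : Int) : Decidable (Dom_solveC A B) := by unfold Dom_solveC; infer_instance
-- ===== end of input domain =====

-- B replaces A's restoring while-loop by a non-shrinking window (one `if` per step) and
-- returns n - j instead of a running max; objective: simpler. A raises IndexError when
-- B < 0 and A ≠ [] (the while loop runs off the end), which Pre_ excludes; B returns 0 there.


-- ===== PORT A =====
-- the `while zeros > B:` loop; fuel is only a totality guard (within Pre_ the loop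
-- always stops before the fuel or the list runs out); the `none` branch is Python's
-- IndexError, excluded by Pre_.
def solveC_while (A : List Int) (B : Int) : Int → Int → Nat → Int × Int
  | zeros, j, 0 => (zeros, j)
  | zeros, j, fuel+1 =>
    if B < zeros then
      match PySem.List.pyGet? A j with
      | some v => solveC_while A B (if v = 0 then zeros - 1 else zeros) (j + 1) fuel
      | none => (zeros, j)
    else (zeros, j)

def solveC (A : List Int) (B : Int) : Int :=
  let n : Int := A.length
  let s := (PySem.List.pyRange 0 n 1).foldl (fun (st : Int × Int × Int) i =>
    let ans := st.1
    let zeros := st.2.1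
    let j := st.2.2
    let zeros := match PySem.List.pyGet? A i with
      | some v => if v = 0 then zeros + 1 else zeros
      | none => zeros
    let zj := solveC_while A B zeros j (A.length + 1)
    (max ans (i - zj.2 + 1), zj.1, zj.2)) (0, 0, 0)
  s.1

-- ===== PORT B =====
def solveC_alt (A : List Int) (B : Int) : Int :=
  let n : Int := A.length
  let s := (PySem.List.pyRange 0 n 1).foldl (fun (st : Int × Int) i =>
    let zeros := st.1
    let j := st.2
    let zeros := match PySem.List.pyGet? A i with
      | some v => if v = 0 then zeros + 1 else zeros
      | none => zeros
    if B < zeros then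
      match PySem.List.pyGet? A j with
      | some v => (if v = 0 then zeros - 1 else zeros, j + 1)
      | none => (zeros, j)
    else (zeros, j)) (0, 0)
  n - s.2

-- ===== PRECONDITION & SPEC =====
-- A raises IndexError whenever B < 0 and A is non-empty (zeros ≥ 0 > B keeps the while
-- loop shrinking past the end of A); Pre_ excludes exactly those inputs.
def Pre_solveC (A : List Int) (B : Int) : Prop := 0 ≤ B ∨ A = []
instance (A : List Int) (B : Int) : Decidable (Pre_solveC A B) := by unfold Pre_solveC; infer_instance
def pvWitness_solveC : List Int × Int := ([1, 0, 1, 0, 0, 1], 1)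

def Spec_solveC (A : List Int) (B : Int) (out : Int) : Prop := out = solveC_alt A B
instance (A : List Int) (B : Int) (out : Int) : Decidable (Spec_solveC A B out) := by unfold Spec_solveC; infer_instance

-- ===== CLAIM (what is proved, stated in full; the proofs are below) =====
def Claim_equal_solveC : Prop := ∀ (A : List Int) (B : Int), Dom_solveC A B → Pre_solveC A B → Spec_solveC A B (solveC A B)

-- ===== LEMMAS AND PROOFS =====

-- number of zeros of A in the half-open index window [j, k)
def cnt (A : List Int) (j k : Nat) : Int := (((A.take k).drop j).countP (· == 0) : Nat)

lemma cnt_antitone (A : List Int) (k : Nat) {j1 j2 : Nat} (h : j1 ≤ j2) :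
    cnt A j2 k ≤ cnt A j1 k := by
  unfold cnt
  have : (A.take k).drop j2 = ((A.take k).drop j1).drop (j2 - j1) := by
    rw [List.drop_drop]; congr 1; omega
  rw [this]
  exact_mod_cast (List.drop_sublist _ _).countP_le

lemma cnt_of_le (A : List Int) {j k : Nat} (h : k ≤ j) : cnt A j k = 0 := by
  unfold cnt
  have : (A.take k).drop j = [] := by
    apply List.drop_eq_nil_of_le
    simp; omega
  simp [this]

lemma cnt_succ_right (A : List Int) {j k : Nat} (hj : j ≤ k) (hk : k < A.length) :
    cnt A j (k+1) = cnt A j k + (if A[k] = 0 then 1 else 0) := by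
  unfold cnt
  rw [List.take_add_one, List.getElem?_eq_getElem hk]
  have hlen : j ≤ (A.take k).length := by simp; omega
  rw [List.drop_append_of_le_length hlen, List.countP_append]
  by_cases h0 : A[k] = 0 <;> simp [h0]

lemma cnt_succ_left (A : List Int) {j k : Nat} (hj : j < k) (hjl : j < A.length) :
    cnt A (j+1) k = cnt A j k - (if A[j] = 0 then 1 else 0) := by
  unfold cnt
  have hjt : j < (A.take k).length := by simp; omega
  have := List.drop_eq_getElem_cons hjt
  rw [this, List.countP_cons]
  have : (A.take k)[j] = A[j] := List.getElem_take
  rw [this]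
  by_cases h0 : A[j] = 0 <;> simp [h0]

lemma cnt_pos_lt (A : List Int) {j k : Nat} (h : 0 < cnt A j k) : j < k ∧ j < A.length := by
  constructor
  · by_contra h1
    have h2 := cnt_of_le A (show k ≤ j by omega)
    omega
  · by_contra h1
    have h2 : (A.take k).drop j = [] := List.drop_eq_nil_of_le (by simp; omega)
    unfold cnt at h
    rw [h2] at h
    simp at h

lemma solveC_while_spec (A : List Int) (B : Int) (hB : 0 ≤ B) (k : Nat) (_hk : k ≤ A.length) :
    ∀ fuel (j : Nat), j ≤ k → k - j ≤ fuel →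
    ∃ j' : Nat, j ≤ j' ∧ j' ≤ k ∧
      solveC_while A B (cnt A j k) (j : Int) fuel = (cnt A j' k, (j' : Int)) ∧
      cnt A j' k ≤ B ∧ (j' = j ∨ B < cnt A (j' - 1) k) := by
  intro fuel
  induction fuel with
  | zero =>
    intro j hjk hfuel
    have hkj : j = k := by omega
    refine ⟨j, le_refl _, hjk, rfl, ?_, Or.inl rfl⟩
    rw [hkj, cnt_of_le A (le_refl k)]; exact hB
  | succ fuel ih =>
    intro j hjk hfuel
    by_cases hgt : B < cnt A j k
    · have hpos : 0 < cnt A j k := lt_of_le_of_lt hB hgt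
      have hjlt := cnt_pos_lt A hpos
      have hstep : cnt A (j+1) k = cnt A j k - (if A[j]'hjlt.2 = 0 then 1 else 0) :=
        cnt_succ_left A hjlt.1 hjlt.2
      obtain ⟨j', hj1, hj2, heq, hle, hmin⟩ := ih (j+1) (by omega) (by omega)
      refine ⟨j', by omega, hj2, ?_, hle, ?_⟩
      · show solveC_while A B (cnt A j k) (j : Int) (fuel+1) = _
        rw [solveC_while]
        rw [if_pos hgt]
        have hg : PySem.List.pyGet? A ((j : Nat) : Int) = some (A[j]'hjlt.2) := by
          simp [hjlt.2]
        rw [hg]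
        simp only []
        have : (if A[j]'hjlt.2 = 0 then cnt A j k - 1 else cnt A j k) = cnt A (j+1) k := by
          rw [hstep]; by_cases h0 : A[j]'hjlt.2 = 0 <;> simp [h0]
        rw [this]
        have hcast : ((j : Int) + 1) = ((j + 1 : Nat) : Int) := by push_cast; ring
        rw [hcast]
        exact heq
      · rcases hmin with h | h
        · right; rw [h]; simpa using hgt
        · right; exact h
    · rw [not_lt] at hgt
      refine ⟨j, le_refl _, hjk, ?_, hgt, Or.inl rfl⟩
      rw [solveC_while, if_neg (by omega)]

lemma cnt_le_succ_right (A : List Int) {j k : Nat} (hj : j ≤ k) (hk : k < A.length) :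
    cnt A j k ≤ cnt A j (k+1) := by
  rw [cnt_succ_right A hj hk]
  by_cases h0 : A[k] = 0 <;> simp [h0]

-- the combined loop invariant, by induction on the processed prefix length
lemma main_inv (A : List Int) (B : Int) (hB : 0 ≤ B) :
    ∀ k : Nat, k ≤ A.length →
    ∃ jA jB : Nat, jB ≤ jA ∧ jA ≤ k ∧
      ((PySem.List.pyRange 0 (k : Int) 1).foldl (fun (st : Int × Int × Int) i =>
          let ans := st.1
          let zeros := st.2.1
          let j := st.2.2
          let zeros := match PySem.List.pyGet? A i with
            | some v => if v = 0 then zeros + 1 else zeros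
            | none => zeros
          let zj := solveC_while A B zeros j (A.length + 1)
          (max ans (i - zj.2 + 1), zj.1, zj.2)) (0, 0, 0))
        = ((k : Int) - (jB : Int), cnt A jA k, (jA : Int)) ∧
      ((PySem.List.pyRange 0 (k : Int) 1).foldl (fun (st : Int × Int) i =>
          let zeros := st.1
          let j := st.2
          let zeros := match PySem.List.pyGet? A i with
            | some v => if v = 0 then zeros + 1 else zeros
            | none => zeros
          if B < zeros then
            match PySem.List.pyGet? A j with
            | some v => (if v = 0 then zeros - 1 else zeros, j + 1)
            | none => (zeros, j)
          else (zeros, j)) (0, 0))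
        = (cnt A jB k, (jB : Int)) ∧
      cnt A jA k ≤ B ∧ (jA = 0 ∨ B < cnt A (jA - 1) k) := by
  intro k
  induction k with
  | zero =>
    intro _
    refine ⟨0, 0, le_refl _, le_refl _, ?_, ?_, ?_, Or.inl rfl⟩
    · simp [PySem.List.pyRange_one_eq_nil, cnt_of_le]
    · simp [PySem.List.pyRange_one_eq_nil, cnt_of_le]
    · rw [cnt_of_le A (le_refl 0)]; exact hB
  | succ k ih =>
    intro hk1
    have hk : k < A.length := by omega
    obtain ⟨jA, jB, hBA, hAk, hfA, hfB, hfeas, hmin⟩ := ih (by omega)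
    have hsplit : PySem.List.pyRange 0 ((k+1 : Nat) : Int) 1
        = PySem.List.pyRange 0 (k : Int) 1 ++ [(k : Int)] := by
      have hc : (((k+1 : Nat)) : Int) = (k : Int) + 1 := by push_cast; ring
      rw [hc, PySem.List.pyRange_one_succ_right (by positivity)]
    have hgetk : PySem.List.pyGet? A ((k : Nat) : Int) = some (A[k]'hk) := by
      simp [hk]
    -- the new zero count after absorbing A[k], for any window start j ≤ k
    have habsorb : ∀ j : Nat, j ≤ k →
        (if A[k]'hk = 0 then cnt A j k + 1 else cnt A j k) = cnt A j (k+1) := by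
      intro j hj
      rw [cnt_succ_right A hj hk]
      by_cases h0 : A[k]'hk = 0 <;> simp [h0]
    -- A side: one fold step
    obtain ⟨jA', hjA'1, hjA'2, hwhile, hfeas', hmin'⟩ :=
      solveC_while_spec A B hB (k+1) (by omega) (A.length + 1) jA (by omega) (by omega)
    have hstepA :
      ((PySem.List.pyRange 0 ((k+1 : Nat) : Int) 1).foldl (fun (st : Int × Int × Int) i =>
          let ans := st.1
          let zeros := st.2.1
          let j := st.2.2
          let zeros := match PySem.List.pyGet? A i with
            | some v => if v = 0 then zeros + 1 else zeros
            | none => zeros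
          let zj := solveC_while A B zeros j (A.length + 1)
          (max ans (i - zj.2 + 1), zj.1, zj.2)) (0, 0, 0))
        = (max ((k : Int) - (jB : Int)) ((k : Int) - (jA' : Int) + 1), cnt A jA' (k+1), (jA' : Int)) := by
      rw [hsplit, List.foldl_append, hfA]
      simp only [List.foldl_cons, List.foldl_nil, hgetk]
      rw [habsorb jA hAk, hwhile]
    -- B side: one fold step, case split on whether the window slides
    by_cases hc : B < cnt A jB (k+1)
    · -- window slides by one: jB' = jB + 1
      have hposB : 0 < cnt A jB (k+1) := lt_of_le_of_lt hB hc
      have hjBlt := cnt_pos_lt A hposB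
      have hgetjB : PySem.List.pyGet? A ((jB : Nat) : Int) = some (A[jB]'hjBlt.2) := by
        simp [hjBlt.2]
      have hdrop : cnt A (jB+1) (k+1) = cnt A jB (k+1) - (if A[jB]'hjBlt.2 = 0 then 1 else 0) :=
        cnt_succ_left A hjBlt.1 hjBlt.2
      -- jA' is strictly beyond jB
      have hjA'gt : jB < jA' := by
        by_contra hle
        have := cnt_antitone A (k+1) (show jA' ≤ jB by omega)
        omega
      refine ⟨jA', jB + 1, by omega, by omega, ?_, ?_, hfeas', ?_⟩
      · rw [hstepA]
        have hmax : max ((k : Int) - (jB : Int)) ((k : Int) - (jA' : Int) + 1)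
            = (k : Int) - (jB : Int) := by
          apply max_eq_left
          have : (jB : Int) + 1 ≤ (jA' : Int) := by exact_mod_cast hjA'gt
          omega
        rw [hmax]
        push_cast
        ring_nf
      · rw [hsplit, List.foldl_append, hfB]
        simp only [List.foldl_cons, List.foldl_nil, hgetk]
        rw [habsorb jB (le_trans hBA hAk), if_pos hc, hgetjB]
        simp only []
        have h1 : (if A[jB]'hjBlt.2 = 0 then cnt A jB (k+1) - 1 else cnt A jB (k+1))
            = cnt A (jB+1) (k+1) := by
          rw [hdrop]; by_cases h0 : A[jB]'hjBlt.2 = 0 <;> simp [h0]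
        rw [h1]
        norm_cast
      · right
        rcases hmin' with h | h
        · -- jA' = jA; since jB < jA' = jA, jA ≥ 1 and the old minimality applies
          subst h
          rcases hmin with h0 | h0
          · omega
          · exact lt_of_lt_of_le h0 (cnt_le_succ_right A (by omega) hk)
        · exact h
    · -- window keeps its width: jB' = jB, and jA = jB = jA'
      rw [not_lt] at hc
      have hBk : cnt A jB k ≤ cnt A jB (k+1) := cnt_le_succ_right A (hBA.trans hAk) hk
      have hAB : jA = jB := by
        by_contra hne
        have hlt : jB < jA := by omega
        rcases hmin with h0 | h0
        · omega
        · have := cnt_antitone A k (show jB ≤ jA - 1 by omega)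
          omega
      subst hAB
      -- with cnt A jA (k+1) ≤ B the while loop returns immediately, so jA' = jA
      have hwhile0 : solveC_while A B (cnt A jA (k+1)) (jA : Int) (A.length + 1)
          = (cnt A jA (k+1), (jA : Int)) := by
        rw [solveC_while, if_neg (by omega)]
      have hjA'eq : jA' = jA := by
        have := hwhile0.symm.trans hwhile
        have h2 : ((jA : Nat) : Int) = ((jA' : Nat) : Int) := congrArg Prod.snd this
        exact_mod_cast h2.symm
      refine ⟨jA, jA, le_refl _, by omega, ?_, ?_, hc, ?_⟩
      · rw [hstepA, hjA'eq]
        have hmax : max ((k : Int) - (jA : Int)) ((k : Int) - (jA : Int) + 1)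
            = (k : Int) - (jA : Int) + 1 := by
          apply max_eq_right; omega
        rw [hmax]
        push_cast
        ring_nf
      · rw [hsplit, List.foldl_append, hfB]
        simp only [List.foldl_cons, List.foldl_nil, hgetk]
        rw [habsorb jA hAk, if_neg (by omega)]
      · rcases hmin with h0 | h0
        · exact Or.inl h0
        · exact Or.inr (lt_of_lt_of_le h0 (cnt_le_succ_right A (by omega) hk))

-- ===== VERDICT (by name: the statement is the Claim_ definition above) =====
theorem solveC_spec : Claim_equal_solveC := by
  intro A B _ hPre
  unfold Spec_solveC
  rcases hPre with hB | hnil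
  · obtain ⟨jA, jB, _, _, hfA, hfB, _, _⟩ := main_inv A B hB A.length (le_refl _)
    simp only [solveC, solveC_alt] at *
    rw [hfA, hfB]
  · subst hnil
    rfl
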